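-- pv_equiv track=rewrite | github.com/jbperin/hello-world | retro/oric/hires3dpuzzle/traj.py | table2text
-- ===== SOURCE A (Python) =====
-- def table2text(name, values):
--     res = f"signed char tab_traj_{name} [] = {{\n"
--     first = True
--     for v in values:
--         if first:
--             first = False
--             h=""
--         else:
--             h=","
--         res += f"\t{h}{v[0]},\t{v[1]},\t{v[2]},\t{v[3]},\t{v[4]}\n"
--     res += "};\n"
--     return res
-- ===== SOURCE B (Python) =====
-- def table2text(name, values):
--     # Recursive, built back to front: the tail of the table (all comma-prefixed
--     # rows plus the closing "};\n") is constructed first by structural recursion,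
--     # and the single comma-free first row is special-cased once at the top,
--     # eliminating A's per-iteration `first` flag.
--     def rest(vs):
--         if not vs:
--             return "};\n"
--         v = vs[0]
--         return f"\t,{v[0]},\t{v[1]},\t{v[2]},\t{v[3]},\t{v[4]}\n" + rest(vs[1:])
--     header = f"signed char tab_traj_{name} [] = {{\n"
--     if not values:
--         return header + "};\n"
--     v = values[0]
--     return header + f"\t{v[0]},\t{v[1]},\t{v[2]},\t{v[3]},\t{v[4]}\n" + rest(values[1:])
-- ===== Notes on version B (the rewrite author's own statement) =====
-- stated objective: alternative
-- what changed: Replaces A's forward accumulator loop with a first-row flag by a back-to-front structural recursion: the suffix (comma-prefixed rows plus the closing brace) is built recursively and the comma-free first row is special-cased once at the top, so no per-iteration flag or comma branch exists.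
import Mathlib
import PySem

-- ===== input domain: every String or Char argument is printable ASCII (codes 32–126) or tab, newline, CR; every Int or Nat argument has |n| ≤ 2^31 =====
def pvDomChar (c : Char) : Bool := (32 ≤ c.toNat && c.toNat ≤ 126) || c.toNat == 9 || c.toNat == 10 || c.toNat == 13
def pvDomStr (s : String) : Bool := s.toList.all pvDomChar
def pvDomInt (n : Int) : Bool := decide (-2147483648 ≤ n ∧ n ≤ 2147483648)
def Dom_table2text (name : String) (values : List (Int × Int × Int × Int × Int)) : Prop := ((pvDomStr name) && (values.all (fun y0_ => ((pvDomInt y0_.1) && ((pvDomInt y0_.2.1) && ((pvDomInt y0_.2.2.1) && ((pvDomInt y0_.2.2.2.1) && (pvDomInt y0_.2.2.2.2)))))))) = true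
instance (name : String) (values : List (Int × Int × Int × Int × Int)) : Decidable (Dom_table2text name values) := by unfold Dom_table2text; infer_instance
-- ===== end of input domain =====

-- B builds the table back to front by structural recursion (comma-prefixed rows
-- plus the closing brace), special-casing the comma-free first row once at the
-- top, instead of A's forward loop with a per-iteration first-flag; objective: alternative decomposition.

-- ===== PORT A =====
def table2text (name : String) (values : List (Int × Int × Int × Int × Int)) : String :=
  let res0 := "signed char tab_traj_" ++ name ++ " [] = {\n"
  let st := values.foldl (fun (st : String × Bool) v =>
      let h := if st.2 then "" else ","
      (st.1 ++ "\t" ++ h ++ PySem.Int.toStr v.1 ++ ",\t" ++ PySem.Int.toStr v.2.1 ++ ",\t"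
        ++ PySem.Int.toStr v.2.2.1 ++ ",\t" ++ PySem.Int.toStr v.2.2.2.1 ++ ",\t"
        ++ PySem.Int.toStr v.2.2.2.2 ++ "\n", false)) (res0, true)
  st.1 ++ "};\n"

-- ===== PORT B =====
-- row content shared by B's two f-strings
def pvRow (v : Int × Int × Int × Int × Int) : String :=
  PySem.Int.toStr v.1 ++ ",\t" ++ PySem.Int.toStr v.2.1 ++ ",\t"
    ++ PySem.Int.toStr v.2.2.1 ++ ",\t" ++ PySem.Int.toStr v.2.2.2.1 ++ ",\t"
    ++ PySem.Int.toStr v.2.2.2.2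

-- B's inner recursive helper `rest`
def pvRest : List (Int × Int × Int × Int × Int) → String
  | [] => "};\n"
  | v :: vs => "\t," ++ pvRow v ++ "\n" ++ pvRest vs

def table2text_alt (name : String) (values : List (Int × Int × Int × Int × Int)) : String :=
  let header := "signed char tab_traj_" ++ name ++ " [] = {\n"
  match values with
  | [] => header ++ "};\n"
  | v :: vs => header ++ "\t" ++ pvRow v ++ "\n" ++ pvRest vs

-- ===== PRECONDITION & SPEC =====
def Spec_table2text (name : String) (values : List (Int × Int × Int × Int × Int)) (out : String) : Prop := out = table2text_alt name values
instance (name : String) (values : List (Int × Int × Int × Int × Int)) (out : String) : Decidable (Spec_table2text name values out) := by unfold Spec_table2text; infer_instance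

-- ===== CLAIM (what is proved, stated in full; the proofs are below) =====
def Claim_equal_table2text : Prop := ∀ (name : String) (values : List (Int × Int × Int × Int × Int)), Dom_table2text name values → Spec_table2text name values (table2text name values)

-- ===== LEMMAS AND PROOFS =====

def pvCat : List String → String
  | [] => ""
  | s :: ss => s ++ pvCat ss

-- after the first row, A's fold appends "\t," ++ row ++ "\n" per element
theorem pv_foldA_false (vs : List (Int × Int × Int × Int × Int)) (acc : String) :
    vs.foldl (fun (st : String × Bool) v =>
      let h := if st.2 then "" else ","
      (st.1 ++ "\t" ++ h ++ PySem.Int.toStr v.1 ++ ",\t" ++ PySem.Int.toStr v.2.1 ++ ",\t"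
        ++ PySem.Int.toStr v.2.2.1 ++ ",\t" ++ PySem.Int.toStr v.2.2.2.1 ++ ",\t"
        ++ PySem.Int.toStr v.2.2.2.2 ++ "\n", false)) (acc, false)
    = (acc ++ pvCat (vs.map (fun v => "\t," ++ pvRow v ++ "\n")), false) := by
  induction vs generalizing acc with
  | nil => simp [pvCat]
  | cons v vs ih =>
    simp only [List.foldl_cons, List.map_cons]
    rw [ih]
    have hc : ("\t" : String) ++ "," = "\t," := by decide
    simp [pvCat, pvRow, hc, String.append_assoc]

-- B's recursive suffix is exactly those per-row appends followed by the closing brace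
theorem pv_rest_eq (vs : List (Int × Int × Int × Int × Int)) :
    pvRest vs = pvCat (vs.map (fun v => "\t," ++ pvRow v ++ "\n")) ++ "};\n" := by
  induction vs with
  | nil => simp [pvRest, pvCat]
  | cons v vs ih => simp [pvRest, pvCat, ih, String.append_assoc]

-- ===== VERDICT (by name: the statement is the Claim_ definition above) =====
theorem table2text_spec : Claim_equal_table2text := by
  intro name values _
  unfold Spec_table2text table2text table2text_alt
  cases values with
  | nil => simp
  | cons v vs =>
    simp only [List.foldl_cons]
    rw [pv_foldA_false, pv_rest_eq]
    simp [pvRow, String.append_assoc]
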